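-- pv_equiv track=rewrite | github.com/gogrean/AdventOfCode | Day11/santa_passwords.py | letter_pairs
-- ===== SOURCE A (Python) =====
-- def letter_pairs(word):
--     overlap = False
--     last_letter = word[0]
--     count = 0
--     last_pair = 26
--     for letter in word[1:]:
--         if letter == last_letter and letter != last_pair:
--             count += 1
--             last_letter = 26
--             last_pair = letter
--         else:
--             last_letter = letter
--     return bool(count > 1)
-- ===== SOURCE B (Python) =====
-- def letter_pairs(word):
--     dups = {a for a, b in zip(word, word[1:]) if a == b}
--     return len(dups) > 1
-- ===== Notes on version B (the rewrite author's own statement) =====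
-- stated objective: simpler
-- what changed: Replaces A's stateful scan (count, last_letter, last_pair sentinel) by a loop-free pipeline: zip the word with its own shift, keep positions where the two characters are equal, deduplicate the letters into a set, and test that more than one distinct letter occurs as an adjacent duplicate.
import Mathlib
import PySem

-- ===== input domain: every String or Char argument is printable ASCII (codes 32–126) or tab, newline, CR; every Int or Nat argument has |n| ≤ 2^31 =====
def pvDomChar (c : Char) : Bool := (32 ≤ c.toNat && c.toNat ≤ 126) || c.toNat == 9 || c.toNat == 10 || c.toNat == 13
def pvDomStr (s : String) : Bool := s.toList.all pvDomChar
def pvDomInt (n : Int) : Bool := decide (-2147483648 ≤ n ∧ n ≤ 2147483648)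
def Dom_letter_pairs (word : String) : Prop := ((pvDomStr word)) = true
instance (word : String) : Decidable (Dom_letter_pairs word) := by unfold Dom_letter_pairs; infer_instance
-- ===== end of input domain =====

-- B replaces A's stateful count/sentinel scan by a loop-free zip-filter-dedup pipeline
-- (simpler); return value only — neither program mutates its argument.

-- ===== PORT A =====
-- A's sentinel 26 (an int, never equal to any character) is ported as 'none' in Option Char:
-- last_letter = 26 / last_pair = 26 become none, a stored letter c becomes 'some c'.
-- Python's 'letter == last_letter' is 'some letter = ll'; 'letter != last_pair' is 'some letter ≠ lp'.
def letter_pairs_step (st : Option Char × Int × Option Char) (letter : Char) :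
    Option Char × Int × Option Char :=
  let (ll, count, lp) := st
  if some letter = ll ∧ some letter ≠ lp then
    (none, count + 1, some letter)
  else
    (some letter, count, lp)

def letter_pairs (word : String) : Bool :=
  match word.toList with
  | [] => false   -- unreachable under Pre_ (word[0] raises IndexError on the empty string)
  | c :: rest =>
    let st := rest.foldl letter_pairs_step (some c, (0 : Int), none)
    decide (st.2.1 > 1)

-- ===== PORT B =====
-- zip(word, word[1:]) → l.zip (l.drop 1); the set comprehension (only its size is used)
-- → PySem.Set.ofList of the filtered letters.
def letter_pairs_alt (word : String) : Bool :=
  let l := word.toList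
  let dups := ((l.zip (l.drop 1)).filter (fun p => p.1 == p.2)).map Prod.fst
  decide ((PySem.Set.ofList dups).length > 1)

-- ===== PRECONDITION & SPEC =====
-- Pre_ excludes only the empty string, on which A raises IndexError at word[0].
def Pre_letter_pairs (word : String) : Prop := word ≠ ""
instance (word : String) : Decidable (Pre_letter_pairs word) := by
  unfold Pre_letter_pairs; infer_instance

def pvWitness_letter_pairs : String := "aabb"

def Spec_letter_pairs (word : String) (out : Bool) : Prop := out = letter_pairs_alt word
instance (word : String) (out : Bool) : Decidable (Spec_letter_pairs word out) := by
  unfold Spec_letter_pairs; infer_instance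

-- ===== CLAIM (what is proved, stated in full; the proofs are below) =====
def Claim_equal_letter_pairs : Prop :=
  ∀ (word : String), Dom_letter_pairs word → Pre_letter_pairs word →
    Spec_letter_pairs word (letter_pairs word)

-- ===== LEMMAS AND PROOFS =====

/-- Proof-side scan: the set of adjacent-duplicate letters, accumulated left to right.
Used only to connect A's fold to B's pipeline. -/
def lpScan (st : Char × PySem.Set Char) (ch : Char) : Char × PySem.Set Char :=
  let (prev, pairs) := st
  if ch = prev then (ch, pairs.add ch) else (ch, pairs)

/-- The dup-letter list of B's pipeline. -/
def lpDups (l : List Char) : List Char :=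
  ((l.zip (l.drop 1)).filter (fun p => p.1 == p.2)).map Prod.fst

/-- B's pipeline computes the same set as the proof-side scan. -/
theorem lpScan_eq_dups_foldl (rest : List Char) (prev : Char) (S : PySem.Set Char) :
    (rest.foldl lpScan (prev, S)).2 = (lpDups (prev :: rest)).foldl PySem.Set.add S := by
  induction rest generalizing prev S with
  | nil => simp [lpDups]
  | cons ch rest ih =>
    by_cases h : ch = prev
    · subst h
      simp [lpDups, List.foldl, lpScan, List.zip] at *
      simpa [lpDups] using ih ch (S.add ch)
    · simp [lpDups, List.foldl, lpScan, h, Ne.symm h, List.zip] at *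
      simpa [lpDups] using ih ch S

/-- Invariant tying A's fold state (last_letter, count, last_pair) to the scan state (prev, pairs). -/
def lpInv (a : Option Char × Int × Option Char) (b : Char × PySem.Set Char) : Prop :=
  (a.1 = some b.1 ∨ (a.1 = none ∧ a.2.2 = some b.1)) ∧
  (∀ c : Char, a.2.2 = some c → c ∈ b.2) ∧
  (1 ≤ a.2.1 → a.2.2 ≠ none) ∧
  (b.2.length : Int) ≤ a.2.1 ∧
  (2 ≤ a.2.1 → 2 ≤ b.2.length) ∧
  b.2.Nodup

theorem lpInv_init (c : Char) : lpInv (some c, (0 : Int), none) (c, PySem.Set.empty) := by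
  refine ⟨Or.inl rfl, ?_, ?_, ?_, ?_, ?_⟩ <;> simp [PySem.Set.empty]

theorem mem_set_add {s : PySem.Set Char} {x y : Char} (h : x ∈ s ∨ x = y) :
    x ∈ PySem.Set.add s y := by
  simp [PySem.Set.add, PySem.Set.contains]
  rcases h with h | h
  · split <;> simp [h]
  · subst h; split
    · next hc => simpa using hc
    · simp

theorem length_set_add_le {s : PySem.Set Char} {y : Char} :
    (PySem.Set.add s y).length ≤ s.length + 1 := by
  simp [PySem.Set.add]
  split <;> simp

theorem set_add_of_mem {s : PySem.Set Char} {y : Char} (h : y ∈ s) :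
    PySem.Set.add s y = s := by
  unfold PySem.Set.add
  rw [if_pos (by simpa [PySem.Set.contains] using h)]

theorem nodup_set_add {s : PySem.Set Char} {y : Char} (h : s.Nodup) :
    (PySem.Set.add s y).Nodup := by
  simp only [PySem.Set.add]
  split
  · exact h
  · next hc =>
    refine List.Nodup.append h (List.nodup_singleton y) ?_
    intro x hx hy
    simp at hy
    subst hy
    exact hc (by simpa [PySem.Set.contains] using hx)

theorem two_le_length_set_add {s : PySem.Set Char} {x y : Char}
    (hx : x ∈ s) (hxy : x ≠ y) (hnd : s.Nodup) : 2 ≤ (PySem.Set.add s y).length := by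
  simp only [PySem.Set.add]
  split
  · next hc =>
    have hy : y ∈ s := by simpa [PySem.Set.contains] using hc
    have : ({x, y} : Finset Char).card ≤ s.toFinset.card := by
      apply Finset.card_le_card
      intro z hz
      simp at hz
      rcases hz with rfl | rfl <;> simp [hx, hy]
    have hxy2 : ({x, y} : Finset Char).card = 2 := Finset.card_pair hxy
    have := hxy2 ▸ this
    calc 2 ≤ s.toFinset.card := this
      _ ≤ s.length := s.toFinset_card_le
  · have : 1 ≤ s.length := List.length_pos_of_mem hx
    simp
    omega

theorem lpInv_step (a : Option Char × Int × Option Char) (b : Char × PySem.Set Char)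
    (h : lpInv a b) (ch : Char) :
    lpInv (letter_pairs_step a ch) (lpScan b ch) := by
  obtain ⟨ll, count, lp⟩ := a
  obtain ⟨prev, pairs⟩ := b
  obtain ⟨hsync, hlp, hcl, hle, h2, hnd⟩ := h
  simp only at hsync hlp hcl hle h2 hnd
  simp only [letter_pairs_step, lpScan]
  by_cases hcp : ch = prev
  · subst hcp
    rcases hsync with hsync | ⟨hll, hlpp⟩
    · subst hsync
      by_cases hpair : some ch ≠ lp
      · rw [if_pos ⟨rfl, hpair⟩, if_pos rfl]
        refine ⟨Or.inr ⟨rfl, rfl⟩, ?_, ?_, ?_, ?_, nodup_set_add hnd⟩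
        · intro c hc
          exact mem_set_add (Or.inr (by injection hc.symm))
        · simp
        · have := @length_set_add_le pairs ch
          simp only
          omega
        · simp only
          intro hc
          by_cases h1 : count ≤ 0
          · omega
          · push_neg at h1
            obtain ⟨c0, hc0⟩ : ∃ c0, lp = some c0 := by
              cases lp with
              | none => exact absurd rfl (hcl h1)
              | some c0 => exact ⟨c0, rfl⟩
            have hc0mem := hlp c0 hc0
            have hc0ne : c0 ≠ ch := by
              intro he; subst he; exact hpair hc0.symm
            exact two_le_length_set_add hc0mem hc0ne hnd
      · push_neg at hpair
        rw [if_neg (by simp [hpair]), if_pos rfl]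
        have hchmem : ch ∈ pairs := hlp ch hpair.symm
        rw [set_add_of_mem hchmem]
        exact ⟨Or.inl rfl, hlp, hcl, hle, h2, hnd⟩
    · subst hll
      rw [if_neg (by simp), if_pos rfl]
      have hchmem : ch ∈ pairs := hlp ch hlpp
      rw [set_add_of_mem hchmem]
      exact ⟨Or.inl rfl, hlp, hcl, hle, h2, hnd⟩
  · have hAneg : ¬ (some ch = ll ∧ some ch ≠ lp) := by
      rintro ⟨he, -⟩
      rcases hsync with hsync | ⟨hll, -⟩
      · rw [hsync] at he; exact hcp (by injection he)
      · rw [hll] at he; exact absurd he (by simp)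
    rw [if_neg hAneg, if_neg hcp]
    exact ⟨Or.inl rfl, hlp, hcl, hle, h2, hnd⟩

theorem lpInv_foldl (rest : List Char) (a : Option Char × Int × Option Char)
    (b : Char × PySem.Set Char) (h : lpInv a b) :
    lpInv (rest.foldl letter_pairs_step a) (rest.foldl lpScan b) := by
  induction rest generalizing a b with
  | nil => exact h
  | cons ch rest ih => exact ih _ _ (lpInv_step a b h ch)

-- ===== VERDICT (by name: the statements are the Claim_ definitions above) =====
theorem letter_pairs_spec : Claim_equal_letter_pairs := by
  intro word _ _
  unfold Spec_letter_pairs letter_pairs letter_pairs_alt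
  cases hw : word.toList with
  | nil => rfl
  | cons c rest =>
    have hinv := lpInv_foldl rest (some c, (0 : Int), none) (c, PySem.Set.empty) (lpInv_init c)
    obtain ⟨-, -, -, hle, h2, -⟩ := hinv
    have hbridge := lpScan_eq_dups_foldl rest c PySem.Set.empty
    have hset : PySem.Set.ofList
        (((((c :: rest).zip ((c :: rest).drop 1))).filter (fun p => p.1 == p.2)).map Prod.fst)
        = (rest.foldl lpScan (c, PySem.Set.empty)).2 := by
      rw [hbridge]
      rfl
    simp only [hset, decide_eq_decide]
    constructor
    · intro hc
      have := h2 (by omega)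
      omega
    · intro hp
      have : (2 : Int) ≤ (List.foldl lpScan (c, PySem.Set.empty) rest).2.length := by
        exact_mod_cast hp
      omega
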